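-- pv_equiv track=rewrite | github.com/SohanRokka4/Hamrobazar_musical_instrument_price-analysis_tool | manage_scraped_data.py | categorize_brand_tier
-- ===== SOURCE A (Python) =====
-- def categorize_brand_tier(name,price):
--     """Classify brands into premium, mid-range, or budget tiers"""
--
--     brand_name = name.split(" ")
--     dirt_cheap = ['givson', 'frender', 'epephone', 'clapton', 'mars', 'pluto', 'vt', 'venus', 'indian', 'hovner', 'signature', 'kasper', 'volume']
--     budget = [ 'f6000', 'mantra', 'dreammaker', 'devisor', 'manaslu', '4-band', 'equaliser', 'tuner', 'dream', 'rocket']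
--     midrange = ['yamaha', 'ibanez', 'takamine', 'crafter', 'enya', 'jet', 'hex', 'cort', 'samick', 'sqoe', 'bacchus', 'cate', 'sx', 'k-marth', 'tagima']
--     premium = ['gibson', 'fender', 'martin', 'taylor', 'prs', 'emg', 'gretsch']
--
--
--     for brand in brand_name:
--         if (brand.lower()  in premium and price < 50000) or (brand.lower()  in midrange and price < 18000):
--             return 'bootleg/budget'
--         elif brand.lower() in dirt_cheap:
--             return 'indian_budget'
--         elif brand.lower() in budget:
--             return 'budget'
--         elif brand.lower() in midrange:
--             return 'midrange'
--         elif brand.lower() in premium: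
--             return 'premium'
--     return 'unknown'
-- ===== SOURCE B (Python) =====
-- # Word -> (final label, optional price cap below which the item is 'bootleg/budget').
-- _TABLE = {}
-- for _w in ['givson', 'frender', 'epephone', 'clapton', 'mars', 'pluto', 'vt', 'venus', 'indian', 'hovner', 'signature', 'kasper', 'volume']:
--     _TABLE[_w] = ('indian_budget', None)
-- for _w in ['f6000', 'mantra', 'dreammaker', 'devisor', 'manaslu', '4-band', 'equaliser', 'tuner', 'dream', 'rocket']:
--     _TABLE[_w] = ('budget', None)
-- for _w in ['yamaha', 'ibanez', 'takamine', 'crafter', 'enya', 'jet', 'hex', 'cort', 'samick', 'sqoe', 'bacchus', 'cate', 'sx', 'k-marth', 'tagima']: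
--     _TABLE[_w] = ('midrange', 18000)
-- for _w in ['gibson', 'fender', 'martin', 'taylor', 'prs', 'emg', 'gretsch']:
--     _TABLE[_w] = ('premium', 50000)
--
-- def categorize_brand_tier(name, price):
--     """Classify brands into price tiers: fold right-to-left over the words with an
--     accumulator, so the earliest recognised word overwrites last and wins."""
--     result = 'unknown'
--     for word in reversed(name.split(" ")):
--         hit = _TABLE.get(word.lower())
--         if hit is not None:
--             label, cap = hit
--             result = 'bootleg/budget' if cap is not None and price < cap else label
--     return result
-- ===== Notes on version B (the rewrite author's own statement) =====
-- stated objective: alternative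
-- what changed: A early-returns from a forward scan through an if/elif ladder of five list membership tests per word; B has no early exit and no branch ladder: it folds right-to-left over the words with an accumulator (earliest hit overwrites last), and the classification is pure data, a table mapping each word to its (label, optional price cap) pair resolved by one comparison.
import Mathlib
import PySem

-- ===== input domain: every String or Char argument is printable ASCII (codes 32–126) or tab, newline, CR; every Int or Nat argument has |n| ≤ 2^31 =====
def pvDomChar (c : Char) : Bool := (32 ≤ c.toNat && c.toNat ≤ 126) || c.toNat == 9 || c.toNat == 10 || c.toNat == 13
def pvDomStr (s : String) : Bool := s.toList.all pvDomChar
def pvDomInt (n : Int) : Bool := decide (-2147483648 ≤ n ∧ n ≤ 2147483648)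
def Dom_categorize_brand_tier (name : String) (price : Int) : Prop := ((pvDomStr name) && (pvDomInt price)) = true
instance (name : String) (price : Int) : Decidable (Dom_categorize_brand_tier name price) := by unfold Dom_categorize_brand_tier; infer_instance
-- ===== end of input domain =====

-- B replaces A's forward early-return scan with five list-membership tests per word by a
-- right-to-left accumulator fold over one word→(label, price cap) table (objective: alternative).
-- Both are total; return values only, no mutation.

-- the four brand lists (shared module constants of both versions)
def pvDirtCheap : List String := ["givson", "frender", "epephone", "clapton", "mars", "pluto", "vt", "venus", "indian", "hovner", "signature", "kasper", "volume"]
def pvBudget : List String := ["f6000", "mantra", "dreammaker", "devisor", "manaslu", "4-band", "equaliser", "tuner", "dream", "rocket"]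
def pvMidrange : List String := ["yamaha", "ibanez", "takamine", "crafter", "enya", "jet", "hex", "cort", "samick", "sqoe", "bacchus", "cate", "sx", "k-marth", "tagima"]
def pvPremium : List String := ["gibson", "fender", "martin", "taylor", "prs", "emg", "gretsch"]

-- ===== PORT A =====
-- A's for-loop over the words, with its if/elif ladder of list-membership tests.
def pvGoA : List String → Int → String
  | [], _ => "unknown"
  | brand :: rest, price =>
    if (PySem.Str.lower brand ∈ pvPremium ∧ price < 50000) ∨ (PySem.Str.lower brand ∈ pvMidrange ∧ price < 18000) then "bootleg/budget"
    else if PySem.Str.lower brand ∈ pvDirtCheap then "indian_budget"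
    else if PySem.Str.lower brand ∈ pvBudget then "budget"
    else if PySem.Str.lower brand ∈ pvMidrange then "midrange"
    else if PySem.Str.lower brand ∈ pvPremium then "premium"
    else pvGoA rest price

def categorize_brand_tier (name : String) (price : Int) : String :=
  -- name.split(" "): sep is the nonempty literal " ", so split? is always `some`
  pvGoA ((PySem.Str.split? name " ").getD []) price

-- ===== PORT B =====
-- the module-level dict _TABLE of Source B: word → (final label, optional price cap)
def pvTable : PySem.Dict String (String × Option Int) :=
  PySem.Dict.ofList
    (pvDirtCheap.map (fun w => (w, ("indian_budget", (none : Option Int))))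
      ++ pvBudget.map (fun w => (w, ("budget", (none : Option Int))))
      ++ pvMidrange.map (fun w => (w, ("midrange", some (18000 : Int))))
      ++ pvPremium.map (fun w => (w, ("premium", some (50000 : Int)))))

-- loop body of Source B: a miss keeps the accumulator, a hit overwrites it
def pvStep (price : Int) (acc : String) (word : String) : String :=
  match pvTable.get? (PySem.Str.lower word) with
  | none => acc
  | some (label, cap) =>
    match cap with
    | some c => if price < c then "bootleg/budget" else label
    | none => label

def categorize_brand_tier_alt (name : String) (price : Int) : String :=
  (((PySem.Str.split? name " ").getD []).reverse).foldl (pvStep price) "unknown"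

-- ===== PRECONDITION & SPEC =====
def Spec_categorize_brand_tier (name : String) (price : Int) (out : String) : Prop := out = categorize_brand_tier_alt name price
instance (name : String) (price : Int) (out : String) : Decidable (Spec_categorize_brand_tier name price out) := by unfold Spec_categorize_brand_tier; infer_instance

-- ===== CLAIM (what is proved, stated in full; the proofs are below) =====
def Claim_equal_categorize_brand_tier : Prop := ∀ (name : String) (price : Int), Dom_categorize_brand_tier name price → Spec_categorize_brand_tier name price (categorize_brand_tier name price)

-- ===== LEMMAS AND PROOFS =====

-- lookup in a literal assoc dict built from one tier's list: first segment decides or fall through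
theorem pvGet_mk_map_append {α : Type} (L : List String) (c : α) (r : List (String × α)) (s : String) :
    (PySem.Dict.mk (L.map (fun w => (w, c)) ++ r)).get? s
      = if s ∈ L then some c else (PySem.Dict.mk r).get? s := by
  induction L with
  | nil => simp
  | cons w L ih =>
    simp only [List.map_cons, List.cons_append, PySem.Dict.get?_mk_cons, ih, List.mem_cons]
    by_cases hw : w = s
    · simp [hw]
    · simp [hw, Ne.symm hw]

-- the built table is the plain (nodup-key) assoc list of its pairs
theorem pvTable_eq_mk :
    pvTable = PySem.Dict.mk
      (pvDirtCheap.map (fun w => (w, ("indian_budget", (none : Option Int))))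
        ++ pvBudget.map (fun w => (w, ("budget", (none : Option Int))))
        ++ pvMidrange.map (fun w => (w, ("midrange", some (18000 : Int))))
        ++ pvPremium.map (fun w => (w, ("premium", some (50000 : Int))))) := by
  set_option maxRecDepth 8192 in decide

theorem pvTable_get (s : String) :
    pvTable.get? s
      = if s ∈ pvDirtCheap then some ("indian_budget", none)
        else if s ∈ pvBudget then some ("budget", none)
        else if s ∈ pvMidrange then some ("midrange", some 18000)
        else if s ∈ pvPremium then some ("premium", some 50000)
        else none := by
  rw [pvTable_eq_mk]
  simp only [List.append_assoc]
  rw [pvGet_mk_map_append, pvGet_mk_map_append, pvGet_mk_map_append,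
    ← List.append_nil (pvPremium.map (fun w => (w, ("premium", some (50000 : Int))))), pvGet_mk_map_append]
  simp [PySem.Dict.get?]

-- the four brand lists are pairwise disjoint
set_option maxRecDepth 4096 in
theorem pvDisj_dc_mid : ∀ s, s ∈ pvDirtCheap → s ∉ pvMidrange := by decide
set_option maxRecDepth 4096 in
theorem pvDisj_dc_prem : ∀ s, s ∈ pvDirtCheap → s ∉ pvPremium := by decide
set_option maxRecDepth 4096 in
theorem pvDisj_bud_mid : ∀ s, s ∈ pvBudget → s ∉ pvMidrange := by decide
set_option maxRecDepth 4096 in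
theorem pvDisj_bud_prem : ∀ s, s ∈ pvBudget → s ∉ pvPremium := by decide
set_option maxRecDepth 4096 in
theorem pvDisj_mid_prem : ∀ s, s ∈ pvMidrange → s ∉ pvPremium := by decide

-- the reversed fold equals A's early-return scan: the last overwrite is the first match
set_option maxRecDepth 100000 in
theorem pvGo_eq (ws : List String) (price : Int) :
    pvGoA ws price = (ws.reverse).foldl (pvStep price) "unknown" := by
  induction ws with
  | nil => rfl
  | cons w rest ih =>
    rw [List.reverse_cons, List.foldl_append, ← ih]
    simp only [pvGoA, List.foldl]
    unfold pvStep
    rw [pvTable_get]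
    set s := PySem.Str.lower w with hs
    by_cases hdc : s ∈ pvDirtCheap
    · have h1 := pvDisj_dc_mid s hdc
      have h2 := pvDisj_dc_prem s hdc
      simp [hdc, h1, h2]
    · by_cases hbud : s ∈ pvBudget
      · have h1 := pvDisj_bud_mid s hbud
        have h2 := pvDisj_bud_prem s hbud
        simp [hdc, hbud, h1, h2]
      · by_cases hmid : s ∈ pvMidrange
        · have h1 := pvDisj_mid_prem s hmid
          by_cases hp : price < 18000 <;> simp [hdc, hbud, hmid, h1, hp]
        · by_cases hprem : s ∈ pvPremium
          · by_cases hp : price < 50000 <;> simp [hdc, hbud, hmid, hprem, hp]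
          · simp [hdc, hbud, hmid, hprem]

-- ===== VERDICT (by name: the statement is the Claim_ definition above) =====
theorem categorize_brand_tier_spec : Claim_equal_categorize_brand_tier := by
  intro name price _
  unfold Spec_categorize_brand_tier categorize_brand_tier categorize_brand_tier_alt
  exact pvGo_eq _ _
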